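-- pv_equiv track=rewrite | github.com/GargoyleArchitecture/archIABack | back/src/graph/nodes/tactics/common.py | _canonicalize_tactic_name
-- ===== SOURCE A (Python) =====
-- def _canonicalize_tactic_name(name: str, allowed: list) -> str:
--     """Fuerza el nombre a uno del catálogo permitido (mejor esfuerzo)."""
--     n = (name or "").strip()
--     if not allowed:
--         return n
--     if not n:
--         return allowed[0]
--     nf = n.casefold()
--     for a in allowed:
--         if a.casefold() == nf:
--             return a
--     for a in allowed:
--         ac = a.casefold()
--         if ac in nf or nf in ac:
--             return a
--     return allowed[0]
-- ===== SOURCE B (Python) =====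
-- def _canonicalize_tactic_name(name: str, allowed: list) -> str:
--     """Single pass over `allowed`: exact casefold match returns immediately;
--     the first substring match is remembered and only used after the full scan."""
--     n = (name or "").strip()
--     if not allowed:
--         return n
--     if not n:
--         return allowed[0]
--     nf = n.casefold()
--     substr_candidate = None
--     for a in allowed:
--         ac = a.casefold()
--         if ac == nf:
--             return a
--         if substr_candidate is None and (ac in nf or nf in ac):
--             substr_candidate = a
--     return substr_candidate if substr_candidate is not None else allowed[0]
-- ===== Notes on version B (the rewrite author's own statement) =====
-- stated objective: alternative
-- what changed: Replaces A's two sequential scans over `allowed` (exact casefold match, then substring match) by a single pass that returns an exact match immediately and remembers the first substring candidate until the scan ends.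
import Mathlib
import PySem

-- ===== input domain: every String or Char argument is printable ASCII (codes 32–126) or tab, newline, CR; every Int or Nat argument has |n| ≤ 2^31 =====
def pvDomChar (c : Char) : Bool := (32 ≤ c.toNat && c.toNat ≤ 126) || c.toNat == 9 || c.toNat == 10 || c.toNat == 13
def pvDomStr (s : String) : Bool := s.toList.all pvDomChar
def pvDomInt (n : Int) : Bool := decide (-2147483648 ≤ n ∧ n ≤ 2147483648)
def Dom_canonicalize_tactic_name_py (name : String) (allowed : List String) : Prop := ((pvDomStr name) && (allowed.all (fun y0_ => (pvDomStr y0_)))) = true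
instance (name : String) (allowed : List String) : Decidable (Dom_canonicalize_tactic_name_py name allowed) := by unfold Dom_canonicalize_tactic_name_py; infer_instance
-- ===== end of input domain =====

-- B folds A's two sequential scans into one pass that remembers the first substring candidate;
-- same cost, alternative structure. `.casefold()` is ported as PySem.Str.lower (exact on the ASCII domain).

-- ===== PORT A =====
-- first for-loop: return the first a with a.casefold() == nf
def pvA_loop1 (nf : String) : List String → Option String
  | [] => none
  | a :: rest => if PySem.Str.lower a == nf then some a else pvA_loop1 nf rest

-- second for-loop: return the first a with ac in nf or nf in ac
def pvA_loop2 (nf : String) : List String → Option String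
  | [] => none
  | a :: rest =>
    let ac := PySem.Str.lower a
    if PySem.Str.isIn ac nf || PySem.Str.isIn nf ac then some a else pvA_loop2 nf rest

def canonicalize_tactic_name_py (name : String) (allowed : List String) : String :=
  let n := PySem.Str.strip name   -- (name or "").strip(): "" if name is "", same value
  match allowed with
  | [] => n
  | a0 :: _ =>
    if n = "" then a0
    else
      let nf := PySem.Str.lower n
      match pvA_loop1 nf allowed with
      | some a => a
      | none =>
        match pvA_loop2 nf allowed with
        | some a => a
        | none => a0

-- ===== PORT B =====
-- single pass: exact match returns at once; first substring match is kept as candidate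
def pvB_loop (nf : String) (a0 : String) : List String → Option String → String
  | [], cand => cand.getD a0
  | a :: rest, cand =>
    let ac := PySem.Str.lower a
    if ac == nf then a
    else if cand.isNone && (PySem.Str.isIn ac nf || PySem.Str.isIn nf ac) then
      pvB_loop nf a0 rest (some a)
    else
      pvB_loop nf a0 rest cand

def canonicalize_tactic_name_py_alt (name : String) (allowed : List String) : String :=
  let n := PySem.Str.strip name
  match allowed with
  | [] => n
  | a0 :: _ =>
    if n = "" then a0
    else pvB_loop (PySem.Str.lower n) a0 allowed none

-- ===== PRECONDITION & SPEC =====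
def Spec_canonicalize_tactic_name_py (name : String) (allowed : List String) (out : String) : Prop := out = canonicalize_tactic_name_py_alt name allowed
instance (name : String) (allowed : List String) (out : String) : Decidable (Spec_canonicalize_tactic_name_py name allowed out) := by unfold Spec_canonicalize_tactic_name_py; infer_instance

-- ===== CLAIM (what is proved, stated in full; the proofs are below) =====
def Claim_equal_canonicalize_tactic_name_py : Prop := ∀ (name : String) (allowed : List String), Dom_canonicalize_tactic_name_py name allowed → Spec_canonicalize_tactic_name_py name allowed (canonicalize_tactic_name_py name allowed)

-- ===== LEMMAS AND PROOFS =====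

-- loop invariant: B's single pass computes "first exact match, else the pending candidate,
-- else the first substring match, else a0"
theorem pvB_loop_eq (nf a0 : String) (l : List String) (cand : Option String) :
    pvB_loop nf a0 l cand =
      match pvA_loop1 nf l with
      | some a => a
      | none =>
        match cand with
        | some c => c
        | none => (pvA_loop2 nf l).getD a0 := by
  induction l generalizing cand with
  | nil => cases cand <;> simp [pvB_loop, pvA_loop1, pvA_loop2]
  | cons a rest ih =>
    simp only [pvB_loop, pvA_loop1, pvA_loop2]
    by_cases hx : PySem.Str.lower a == nf
    · simp [hx]
    · simp only [hx, if_false, Bool.false_eq_true]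
      cases cand with
      | some c =>
        simp [ih]
      | none =>
        by_cases hs : PySem.Chars.isIn (PySem.Chars.lower a.toList) nf.toList = true ∨
            PySem.Chars.isIn nf.toList (PySem.Chars.lower a.toList) = true
        · simp [PySem.Str.isIn, hs, ih]
        · simp [PySem.Str.isIn, hs, ih]

-- ===== VERDICT (by name: the statement is the Claim_ definition above) =====
theorem canonicalize_tactic_name_py_spec : Claim_equal_canonicalize_tactic_name_py := by
  intro name allowed _
  unfold Spec_canonicalize_tactic_name_py canonicalize_tactic_name_py canonicalize_tactic_name_py_alt
  cases allowed with
  | nil => rfl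
  | cons a0 rest =>
    by_cases hn : PySem.Str.strip name = ""
    · simp [hn]
    · simp only [hn, if_false]
      rw [pvB_loop_eq]
      cases h1 : pvA_loop1 (PySem.Str.lower (PySem.Str.strip name)) (a0 :: rest) with
      | some a => rfl
      | none =>
        cases h2 : pvA_loop2 (PySem.Str.lower (PySem.Str.strip name)) (a0 :: rest) <;> rfl
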